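-- pv_equiv track=rewrite | github.com/Einfeld686/MarsDiskSimulation | scripts/runsets/windows/preflight_checks.py | _parse_xcopy_flags
-- ===== SOURCE A (Python) =====
-- def _normalize_exe_token(token: str) -> str:
--     return token.strip().strip('"').strip("'")
--
-- def _parse_xcopy_flags(tokens: list[str]) -> tuple[bool, bool, bool, bool, bool]:
--     has_w = False
--     has_p = False
--     has_y = False
--     has_i = False
--     has_no_y = False
--     for raw in tokens:
--         token = _normalize_exe_token(raw).lower()
--         if not token.startswith("/"):
--             continue
--         if token.startswith("/-y"):
--             has_no_y = True
--             continue
--         body = token[1:]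
--         if ":" in body:
--             continue
--         if not body:
--             continue
--         if "w" in body:
--             has_w = True
--         if "p" in body:
--             has_p = True
--         if "y" in body:
--             has_y = True
--         if "i" in body:
--             has_i = True
--     return has_w, has_p, has_y, has_i, has_no_y
-- ===== SOURCE B (Python) =====
-- def _parse_xcopy_flags(tokens: list[str]) -> tuple[bool, bool, bool, bool, bool]:
--     norm = [t.strip().strip('"').strip("'").lower() for t in tokens]
--     has_no_y = any(t.startswith("/-y") for t in norm)
--     bodies = "".join(
--         t[1:]
--         for t in norm
--         if t.startswith("/")
--         and not t.startswith("/-y")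
--         and t[1:]
--         and ":" not in t[1:]
--     )
--     return ("w" in bodies, "p" in bodies, "y" in bodies, "i" in bodies, has_no_y)
-- ===== Notes on version B (the rewrite author's own statement) =====
-- stated objective: alternative
-- what changed: A is a single stateful loop updating five mutable booleans per token; B is a stateless staged pipeline: normalize all tokens once, detect '/-y' with any(), join all accepted flag bodies into one string, and answer the four membership questions on that string at the end.
import Mathlib
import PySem

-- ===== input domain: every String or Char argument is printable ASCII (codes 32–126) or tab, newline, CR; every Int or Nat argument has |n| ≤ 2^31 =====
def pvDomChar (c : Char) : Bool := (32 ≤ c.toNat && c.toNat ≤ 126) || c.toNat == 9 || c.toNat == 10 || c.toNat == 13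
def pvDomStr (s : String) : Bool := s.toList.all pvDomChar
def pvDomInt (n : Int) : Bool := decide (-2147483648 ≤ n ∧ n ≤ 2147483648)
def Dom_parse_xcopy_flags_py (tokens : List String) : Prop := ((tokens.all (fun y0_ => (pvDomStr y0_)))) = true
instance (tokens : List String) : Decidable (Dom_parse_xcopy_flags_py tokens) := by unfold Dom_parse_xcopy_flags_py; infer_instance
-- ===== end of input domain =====

-- B replaces A's single stateful loop over five mutable flags by a stateless staged
-- pipeline: normalize all tokens, take any() for '/-y', join the accepted flag bodies
-- into one string, and answer the four membership questions on it (no speed claim).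

-- ===== PORT A =====
-- _normalize_exe_token(raw).lower() : raw.strip().strip('"').strip("'") then lower
def pvNormToken (raw : String) : String :=
  PySem.Str.lower (PySem.Str.stripChars (PySem.Str.stripChars (PySem.Str.strip raw) "\"") "'")

-- the body of A's for-loop, one token at a time
def pvStepA (st : Bool × Bool × Bool × Bool × Bool) (raw : String) :
    Bool × Bool × Bool × Bool × Bool :=
  let token := pvNormToken raw
  if !PySem.Str.startswith token "/" then st
  else if PySem.Str.startswith token "/-y" then
    (st.1, st.2.1, st.2.2.1, st.2.2.2.1, true)
  else
    let body := PySem.Str.slice token (some 1) none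
    if PySem.Str.isIn ":" body then st
    else if body == "" then st
    else
      ((if PySem.Str.isIn "w" body then true else st.1),
       (if PySem.Str.isIn "p" body then true else st.2.1),
       (if PySem.Str.isIn "y" body then true else st.2.2.1),
       (if PySem.Str.isIn "i" body then true else st.2.2.2.1),
       st.2.2.2.2)

def parse_xcopy_flags_py (tokens : List String) : Bool × Bool × Bool × Bool × Bool :=
  tokens.foldl pvStepA (false, false, false, false, false)

-- ===== PORT B =====
-- the filter/map of B's generator expression: the accepted flag body of a normalized token
def pvBodyB (t : String) : Option String :=
  let b := PySem.Str.slice t (some 1) none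
  if PySem.Str.startswith t "/" && !PySem.Str.startswith t "/-y"
      && b != "" && !PySem.Str.isIn ":" b then some b else none

def parse_xcopy_flags_py_alt (tokens : List String) : Bool × Bool × Bool × Bool × Bool :=
  let norm := tokens.map pvNormToken
  let has_no_y := norm.any (fun t => PySem.Str.startswith t "/-y")
  let bodies := PySem.Str.join "" (norm.filterMap pvBodyB)
  (PySem.Str.isIn "w" bodies, PySem.Str.isIn "p" bodies,
   PySem.Str.isIn "y" bodies, PySem.Str.isIn "i" bodies, has_no_y)

-- ===== PRECONDITION & SPEC =====
def Spec_parse_xcopy_flags_py (tokens : List String) (out : Bool × Bool × Bool × Bool × Bool) : Prop := out = parse_xcopy_flags_py_alt tokens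
instance (tokens : List String) (out : Bool × Bool × Bool × Bool × Bool) : Decidable (Spec_parse_xcopy_flags_py tokens out) := by unfold Spec_parse_xcopy_flags_py; infer_instance

-- ===== CLAIM (what is proved, stated in full; the proofs are below) =====
def Claim_equal_parse_xcopy_flags_py : Prop := ∀ (tokens : List String), Dom_parse_xcopy_flags_py tokens → Spec_parse_xcopy_flags_py tokens (parse_xcopy_flags_py tokens)

-- ===== LEMMAS AND PROOFS =====

-- the character content of all accepted bodies, and the '/-y' detector (proof views of B)
def pvChars (ts : List String) : List Char :=
  (((ts.map pvNormToken).filterMap pvBodyB).map String.toList).flatten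

def pvN (ts : List String) : Bool :=
  (ts.map pvNormToken).any (fun t => PySem.Str.startswith t "/-y")

theorem pv_singleton_infix {α : Type} (a : α) (l : List α) : [a] <:+: l ↔ a ∈ l := by
  constructor
  · intro h; exact h.subset (List.mem_singleton_self a)
  · intro h
    obtain ⟨s, t, rfl⟩ := List.append_of_mem h
    exact ⟨s, t, by simp⟩

theorem pv_isIn_single (c : Char) (l : List Char) :
    PySem.Chars.isIn [c] l = decide (c ∈ l) := by
  by_cases h : c ∈ l
  · simp only [h, decide_true]
    rw [PySem.Chars.isIn_iff_infix]
    exact (pv_singleton_infix c l).mpr h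
  · simp only [h, decide_false]
    rw [PySem.Chars.isIn_eq_false_iff]
    exact fun hin => h ((pv_singleton_infix c l).mp hin)

theorem pv_isIn_single_append (c : Char) (l₁ l₂ : List Char) :
    PySem.Chars.isIn [c] (l₁ ++ l₂) =
      (PySem.Chars.isIn [c] l₁ || PySem.Chars.isIn [c] l₂) := by
  simp only [pv_isIn_single, List.mem_append]
  by_cases h1 : c ∈ l₁ <;> by_cases h2 : c ∈ l₂ <;> simp [h1, h2]

theorem pv_chars_startswith_slash (l : List Char)
    (h : PySem.Chars.startswith l ['/', '-', 'y'] = true) :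
    PySem.Chars.startswith l ['/'] = true := by
  rw [PySem.Chars.startswith_iff] at h ⊢
  exact List.IsPrefix.trans (by simp) h

theorem pv_join_empty (ls : List (List Char)) :
    PySem.Chars.join [] ls = ls.flatten := by
  induction ls with
  | nil => simp [PySem.Chars.join_nil]
  | cons p rest ih =>
    cases rest with
    | nil => simp [PySem.Chars.join_singleton]
    | cons q r => simp [PySem.Chars.join_cons_cons, ih]

theorem pvChars_cons_none (raw : String) (rest : List String)
    (hb : pvBodyB (pvNormToken raw) = none) :
    pvChars (raw :: rest) = pvChars rest := by
  unfold pvChars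
  rw [List.map_cons, List.filterMap_cons, hb]

theorem pvChars_cons_some (raw : String) (rest : List String) (body : String)
    (hb : pvBodyB (pvNormToken raw) = some body) :
    pvChars (raw :: rest) = body.toList ++ pvChars rest := by
  unfold pvChars
  rw [List.map_cons, List.filterMap_cons, hb, List.map_cons, List.flatten_cons]

theorem pvN_cons (raw : String) (rest : List String) :
    pvN (raw :: rest) = (PySem.Str.startswith (pvNormToken raw) "/-y" || pvN rest) := by
  unfold pvN
  rw [List.map_cons, List.any_cons]

-- the loop of A computes, on top of any start state, exactly the or of the
-- membership answers over the accumulated body characters plus the '/-y' detector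
theorem pv_fold (ts : List String) (a b c d e : Bool) :
    ts.foldl pvStepA (a, b, c, d, e) =
      (a || PySem.Chars.isIn ['w'] (pvChars ts), b || PySem.Chars.isIn ['p'] (pvChars ts),
       c || PySem.Chars.isIn ['y'] (pvChars ts), d || PySem.Chars.isIn ['i'] (pvChars ts),
       e || pvN ts) := by
  induction ts generalizing a b c d e with
  | nil => simp [pvChars, pvN, pv_isIn_single]
  | cons raw rest ih =>
    rw [List.foldl_cons, pvN_cons]
    by_cases hy : PySem.Chars.startswith (pvNormToken raw).toList ['/', '-', 'y'] = true
    · have hs := pv_chars_startswith_slash _ hy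
      have hb : pvBodyB (pvNormToken raw) = none := by simp [pvBodyB, hy]
      have hstep : pvStepA (a, b, c, d, e) raw = (a, b, c, d, true) := by
        simp [pvStepA, hy, hs]
      rw [hstep, ih, pvChars_cons_none raw rest hb]
      have hy' : PySem.Str.startswith (pvNormToken raw) "/-y" = true := by
        simp only [PySem.Str.startswith_eq]; exact hy
      rw [hy']
      simp
    · by_cases hs : PySem.Chars.startswith (pvNormToken raw).toList ['/'] = true
      · have hy' : PySem.Str.startswith (pvNormToken raw) "/-y" = false := by
          simp only [PySem.Str.startswith_eq]; simpa using hy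
        by_cases hc : PySem.Chars.isIn [':'] (PySem.List.slice (pvNormToken raw).toList (some 1) none) = true
        · have hb : pvBodyB (pvNormToken raw) = none := by
            simp only [pvBodyB]
            simp [hy, hs]
            intro _
            exact hc
          have hstep : pvStepA (a, b, c, d, e) raw = (a, b, c, d, e) := by
            simp [pvStepA, hy, hs, hc]
          rw [hstep, ih, pvChars_cons_none raw rest hb, hy']
          simp
        · by_cases he : PySem.Str.slice (pvNormToken raw) (some 1) none = ""
          · have hnil : (PySem.Str.slice (pvNormToken raw) (some 1) none).toList = [] := by
              rw [he]; rfl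
            have hb : pvBodyB (pvNormToken raw) = none := by
              simp [pvBodyB, hy, hs, he]
            have hstep : pvStepA (a, b, c, d, e) raw = (a, b, c, d, e) := by
              simp [pvStepA, hy, hs, he]
            rw [hstep, ih, pvChars_cons_none raw rest hb, hy']
            simp
          · have hb : pvBodyB (pvNormToken raw) =
                some (PySem.Str.slice (pvNormToken raw) (some 1) none) := by
              simp [pvBodyB, hy, hs, he]
              simpa using hc
            have hstep : pvStepA (a, b, c, d, e) raw =
                (PySem.Chars.isIn ['w'] (PySem.List.slice (pvNormToken raw).toList (some 1) none) || a,
                 PySem.Chars.isIn ['p'] (PySem.List.slice (pvNormToken raw).toList (some 1) none) || b,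
                 PySem.Chars.isIn ['y'] (PySem.List.slice (pvNormToken raw).toList (some 1) none) || c,
                 PySem.Chars.isIn ['i'] (PySem.List.slice (pvNormToken raw).toList (some 1) none) || d,
                 e) := by
              simp [pvStepA, hy, hs, hc, he]
            rw [hstep, ih, pvChars_cons_some raw rest _ hb, hy']
            simp only [PySem.Str.toList_slice, PySem.Chars.slice_eq_listSlice,
              pv_isIn_single_append, Bool.false_or]
            cases a <;> cases b <;> cases c <;> cases d <;> cases e <;> simp
      · have hb : pvBodyB (pvNormToken raw) = none := by simp [pvBodyB, hs]
        have hstep : pvStepA (a, b, c, d, e) raw = (a, b, c, d, e) := by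
          simp [pvStepA, hs]
        have hy' : PySem.Str.startswith (pvNormToken raw) "/-y" = false := by
          simp only [PySem.Str.startswith_eq]; simpa using hy
        rw [hstep, ih, pvChars_cons_none raw rest hb, hy']
        simp

-- ===== VERDICT (by name: the statement is the Claim_ definition above) =====
theorem parse_xcopy_flags_py_spec : Claim_equal_parse_xcopy_flags_py := by
  intro tokens _
  unfold Spec_parse_xcopy_flags_py parse_xcopy_flags_py
  have hb : (PySem.Str.join "" ((tokens.map pvNormToken).filterMap pvBodyB)).toList
      = pvChars tokens := by
    rw [PySem.Str.toList_join, show ("".toList : List Char) = [] from rfl, pv_join_empty]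
    rfl
  have halt : parse_xcopy_flags_py_alt tokens =
      (PySem.Str.isIn "w" (PySem.Str.join "" ((tokens.map pvNormToken).filterMap pvBodyB)),
       PySem.Str.isIn "p" (PySem.Str.join "" ((tokens.map pvNormToken).filterMap pvBodyB)),
       PySem.Str.isIn "y" (PySem.Str.join "" ((tokens.map pvNormToken).filterMap pvBodyB)),
       PySem.Str.isIn "i" (PySem.Str.join "" ((tokens.map pvNormToken).filterMap pvBodyB)),
       pvN tokens) := rfl
  have hmem : ∀ c : Char,
      PySem.Chars.isIn [c] ((PySem.Str.join "" ((tokens.map pvNormToken).filterMap pvBodyB)).toList)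
        = PySem.Chars.isIn [c] (pvChars tokens) := fun c => by rw [hb]
  rw [pv_fold, halt, PySem.Str.isIn_eq, PySem.Str.isIn_eq, PySem.Str.isIn_eq, PySem.Str.isIn_eq,
    show ("w".toList : List Char) = ['w'] from rfl,
    show ("p".toList : List Char) = ['p'] from rfl,
    show ("y".toList : List Char) = ['y'] from rfl,
    show ("i".toList : List Char) = ['i'] from rfl,
    hmem 'w', hmem 'p', hmem 'y', hmem 'i']
  simp only [Bool.false_or]
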